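-- pv_equiv track=rewrite | github.com/unimauro/QuantumResources | update_docs.py | _categorize_qml_resource
-- ===== SOURCE A (Python) =====
-- def _categorize_qml_resource(title: str, link: str) -> str:
--     """Categoriza un recurso QML"""
--     title_lower = title.lower()
--     link_lower = link.lower()
--
--     if any(word in title_lower for word in ['course', 'mooc', 'tutorial', 'learn']):
--         return 'courses'
--     elif any(word in title_lower for word in ['paper', 'arxiv', 'pdf']):
--         return 'papers'
--     elif any(word in link_lower for word in ['youtube', 'video', 'talk']):
--         return 'videos'
--     elif any(word in link_lower for word in ['github', 'gitlab', 'tool', 'pennylane']):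
--         return 'tools'
--     else:
--         return 'papers'  # default
-- ===== SOURCE B (Python) =====
-- _KEYWORD_PRIORITY = {
--     'course': 0, 'mooc': 0, 'tutorial': 0, 'learn': 0,
--     'paper': 1, 'arxiv': 1, 'pdf': 1,
--     'youtube': 2, 'video': 2, 'talk': 2,
--     'github': 3, 'gitlab': 3, 'tool': 3, 'pennylane': 3,
-- }
-- _CATEGORY_OF_PRIORITY = ('courses', 'papers', 'videos', 'tools', 'papers')
--
--
-- def _categorize_qml_resource(title: str, link: str) -> str:
--     """Categoriza un recurso QML (exhaustive keyword scoring: min priority wins)"""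
--     tl = title.lower()
--     ll = link.lower()
--     best = min((p for w, p in _KEYWORD_PRIORITY.items()
--                 if w in (tl if p < 2 else ll)), default=4)
--     return _CATEGORY_OF_PRIORITY[best]
-- ===== Notes on version B (the rewrite author's own statement) =====
-- stated objective: alternative
-- what changed: B scores every keyword (flat keyword-to-priority map, no ordered branch chain and no early exit), reduces the matched priorities with min (default 4), and maps the resulting priority to a category; A short-circuits through an ordered if/elif chain of group checks.
import Mathlib
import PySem

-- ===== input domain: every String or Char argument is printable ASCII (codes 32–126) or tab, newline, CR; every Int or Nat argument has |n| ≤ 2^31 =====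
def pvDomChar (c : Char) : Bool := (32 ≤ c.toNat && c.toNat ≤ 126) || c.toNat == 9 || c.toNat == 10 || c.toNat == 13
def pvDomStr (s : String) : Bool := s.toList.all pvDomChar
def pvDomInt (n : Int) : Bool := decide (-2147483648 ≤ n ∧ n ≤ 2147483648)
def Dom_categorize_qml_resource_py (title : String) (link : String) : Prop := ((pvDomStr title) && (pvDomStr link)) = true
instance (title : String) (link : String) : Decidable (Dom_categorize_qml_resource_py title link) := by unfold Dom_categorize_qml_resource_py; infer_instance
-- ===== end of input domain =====

-- B replaces A's ordered short-circuit if/elif chain by exhaustive keyword scoring: every keyword is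
-- checked against its source text, the minimum matched priority (default 4) selects the category (alternative, same cost).

-- ===== PORT A =====
-- any(w in text for w in words)
def anyIn (words : List String) (text : String) : Bool :=
  words.any (fun w => PySem.Str.isIn w text)

-- literal port of A's if/elif chain
def categorize_qml_resource_py (title : String) (link : String) : String :=
  let title_lower := PySem.Str.lower title
  let link_lower := PySem.Str.lower link
  if anyIn ["course", "mooc", "tutorial", "learn"] title_lower then
    "courses"
  else if anyIn ["paper", "arxiv", "pdf"] title_lower then
    "papers"
  else if anyIn ["youtube", "video", "talk"] link_lower then
    "videos"
  else if anyIn ["github", "gitlab", "tool", "pennylane"] link_lower then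
    "tools"
  else
    "papers"

-- ===== PORT B =====
-- the _KEYWORD_PRIORITY dict of Source B, as an association list in insertion order
def kwEntries (kws : List String) (p : Int) : List (String × Int) := kws.map (fun w => (w, p))

def kwPriority : List (String × Int) :=
  kwEntries ["course", "mooc", "tutorial", "learn"] 0 ++
  kwEntries ["paper", "arxiv", "pdf"] 1 ++
  kwEntries ["youtube", "video", "talk"] 2 ++
  kwEntries ["github", "gitlab", "tool", "pennylane"] 3

-- the _CATEGORY_OF_PRIORITY tuple lookup of Source B (best is always in 0..4)
def catOfPriority (best : Int) : String :=
  if best = 0 then "courses" else if best = 1 then "papers"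
  else if best = 2 then "videos" else if best = 3 then "tools" else "papers"

-- port of B: min over the priorities of all matched keywords, default 4
def categorize_qml_resource_py_alt (title : String) (link : String) : String :=
  let tl := PySem.Str.lower title
  let ll := PySem.Str.lower link
  let best := ((kwPriority.filter
      (fun e => PySem.Str.isIn e.1 (if e.2 < 2 then tl else ll))).map Prod.snd).foldl min 4
  catOfPriority best

-- ===== PRECONDITION & SPEC =====
def Spec_categorize_qml_resource_py (title : String) (link : String) (out : String) : Prop := out = categorize_qml_resource_py_alt title link
instance (title : String) (link : String) (out : String) : Decidable (Spec_categorize_qml_resource_py title link out) := by unfold Spec_categorize_qml_resource_py; infer_instance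

-- ===== CLAIM (what is proved, stated in full; the proofs are below) =====
def Claim_equal_categorize_qml_resource_py : Prop := ∀ (title : String) (link : String), Dom_categorize_qml_resource_py title link → Spec_categorize_qml_resource_py title link (categorize_qml_resource_py title link)

-- ===== LEMMAS AND PROOFS =====

-- folding min over the matched priorities of one uniform-priority keyword group
theorem foldl_min_kwEntries (kws : List String) (p : Int) (tl ll : String) (acc : Int) :
    (((kwEntries kws p).filter (fun e => PySem.Str.isIn e.1 (if e.2 < 2 then tl else ll))).map Prod.snd).foldl min acc
      = if kws.any (fun w => PySem.Str.isIn w (if p < 2 then tl else ll)) then min acc p else acc := by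
  induction kws generalizing acc with
  | nil => simp [kwEntries]
  | cons w ws ih =>
      simp only [kwEntries, List.map_cons, List.filter_cons, List.any_cons]
      by_cases h : PySem.Str.isIn w (if p < 2 then tl else ll) = true
      · simp only [h, Bool.true_or, if_true, List.map_cons, List.foldl_cons]
        have step := ih (min acc p)
        simp only [kwEntries] at step
        rw [step]
        by_cases ha : (ws.any fun w => PySem.Str.isIn w (if p < 2 then tl else ll)) = true <;>
          simp [ha, min_assoc, min_self]
      · rw [Bool.not_eq_true] at h
        simp only [h, Bool.false_or, Bool.false_eq_true, if_false]
        have step := ih acc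
        simp only [kwEntries] at step
        rw [step]

-- ===== VERDICT (by name: the statement is the Claim_ definition above) =====
theorem categorize_qml_resource_py_spec : Claim_equal_categorize_qml_resource_py := by
  intro title link _
  unfold Spec_categorize_qml_resource_py categorize_qml_resource_py categorize_qml_resource_py_alt anyIn
  set tl := PySem.Str.lower title with htl
  set ll := PySem.Str.lower link with hll
  simp only [kwPriority, List.filter_append, List.map_append, List.foldl_append]
  rw [foldl_min_kwEntries, foldl_min_kwEntries, foldl_min_kwEntries, foldl_min_kwEntries]
  simp only [show (if ((0:Int) < 2) then tl else ll) = tl from if_pos (by norm_num),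
    show (if ((1:Int) < 2) then tl else ll) = tl from if_pos (by norm_num),
    show (if ((2:Int) < 2) then tl else ll) = ll from if_neg (by norm_num),
    show (if ((3:Int) < 2) then tl else ll) = ll from if_neg (by norm_num)]
  cases h0 : (["course", "mooc", "tutorial", "learn"].any fun w => PySem.Str.isIn w tl) <;>
  cases h1 : (["paper", "arxiv", "pdf"].any fun w => PySem.Str.isIn w tl) <;>
  cases h2 : (["youtube", "video", "talk"].any fun w => PySem.Str.isIn w ll) <;>
  cases h3 : (["github", "gitlab", "tool", "pennylane"].any fun w => PySem.Str.isIn w ll) <;>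
    simp_all [catOfPriority, min_def]
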